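-- pv_equiv track=rewrite | github.com/bagassj/FTS-Chain | FTS-MarkovChain.py | flrg
-- ===== SOURCE A (Python) =====
-- def flrg(listIntervalTable,tempFLR):
--   curr = []
--   for i in listIntervalTable:
--     curr.append(i[1])
--
--   tempNext = []
--   for i in range(len(listIntervalTable)):
--     tempNext.append([])
--   for i in range(len(tempNext)):
--     for x in tempFLR:
--       if curr[i] == x[0] and x[1]:
--         tempNext[i].append(x[1])
--     tempNext[i].sort(key= lambda x: (len(x), x))
--
--   sumNext = []
--   for i in listIntervalTable:
--     sumNext.append([])
--
--   for i in range(len(tempNext)):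
--     for x in listIntervalTable:
--       sumNext[i].append(tempNext[i].count(x[1]))
--
--   tempNext2 = []
--   for i in range(len(listIntervalTable)):
--     tempNext2.append([])
--   for i in range(len(tempNext2)):
--     for x in tempFLR:
--       if curr[i] == x[0] and x[1] not in tempNext2[i]:
--         tempNext2[i].append(x[1])
--     tempNext2[i].sort(key= lambda x: (len(x), x))
--
--   next = []
--   for i in range(len(tempNext2)):
--     str = ""
--     str = ", ".join(tempNext2[i])
--     next.append(str)
--   return list(zip(curr, next)), list(zip(curr, tempNext2, sumNext)), sumNext
-- ===== SOURCE B (Python) =====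
-- def flrg(listIntervalTable, tempFLR):
--     # index tempFLR once: antecedent -> ordered list of its consequents
--     groups = {}
--     for x in tempFLR:
--         groups.setdefault(x[0], []).append(x[1])
--     keyf = lambda s: (len(s), s)
--     out1, out2, sums = [], [], []
--     for row in listIntervalTable:
--         c = row[1]
--         g = groups.get(c, [])
--         tn = sorted([b for b in g if b], key=keyf)
--         tn2 = sorted(dict.fromkeys(g), key=keyf)
--         cnt = {}
--         for b in tn:
--             cnt[b] = cnt.get(b, 0) + 1
--         s = [cnt.get(r[1], 0) for r in listIntervalTable]
--         out1.append((c, ", ".join(tn2)))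
--         out2.append((c, tn2, s))
--         sums.append(s)
--     return out1, out2, sums
-- ===== Notes on version B (the rewrite author's own statement) =====
-- stated objective: faster
-- what changed: B builds a dict index of tempFLR (antecedent -> consequent list) once and a per-row counter dict, producing all three outputs in a single pass over the rows instead of A's per-row rescans of tempFLR and per-cell list.count rescans.
-- outside the precondition, e.g. on flrg([], [['a']]): A returns ([], [], []), B raises IndexError
import Mathlib
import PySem

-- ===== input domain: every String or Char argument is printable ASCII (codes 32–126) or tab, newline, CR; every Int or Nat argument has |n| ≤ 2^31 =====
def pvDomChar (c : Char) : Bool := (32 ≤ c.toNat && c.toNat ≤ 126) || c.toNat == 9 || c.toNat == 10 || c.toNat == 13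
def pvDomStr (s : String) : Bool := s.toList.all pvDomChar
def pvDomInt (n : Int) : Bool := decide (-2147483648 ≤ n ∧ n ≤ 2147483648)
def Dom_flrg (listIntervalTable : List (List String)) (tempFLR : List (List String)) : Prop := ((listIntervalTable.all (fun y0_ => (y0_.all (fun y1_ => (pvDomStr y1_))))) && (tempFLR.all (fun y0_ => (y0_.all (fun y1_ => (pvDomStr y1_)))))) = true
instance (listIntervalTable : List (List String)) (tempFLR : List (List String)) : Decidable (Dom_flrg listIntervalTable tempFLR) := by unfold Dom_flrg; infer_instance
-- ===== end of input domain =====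

-- B indexes tempFLR once into a dict (antecedent -> consequents) and builds all three
-- outputs in a single pass over the rows, replacing A's per-row rescans of tempFLR and
-- the per-cell .count rescans (via a counter dict per row); equivalence of return values.

-- shared row-indexing helper: Python's l[k]; "" is only returned outside Pre_flrg
def pyStrAt (l : List String) (k : Int) : String := (PySem.List.pyGet? l k).getD ""

-- ===== PORT A =====
def flrgCurr (listIntervalTable : List (List String)) : List String :=
  listIntervalTable.foldl (fun acc i => acc ++ [pyStrAt i 1]) []

def flrgTempNextAt (tempFLR : List (List String)) (c : String) : List String :=
  PySem.List.sorted2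
    (tempFLR.foldl (fun acc x =>
      if (c == pyStrAt x 0) && (pyStrAt x 1 != "") then acc ++ [pyStrAt x 1] else acc) [])
    PySem.Str.len (fun s => s)

def flrgSumAt (listIntervalTable : List (List String)) (tni : List String) : List Int :=
  listIntervalTable.foldl (fun acc x => acc ++ [(PySem.List.count tni (pyStrAt x 1) : Int)]) []

def flrgTempNext2At (tempFLR : List (List String)) (c : String) : List String :=
  PySem.List.sorted2
    (tempFLR.foldl (fun acc x =>
      if (c == pyStrAt x 0) && !(acc.contains (pyStrAt x 1)) then acc ++ [pyStrAt x 1] else acc) [])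
    PySem.Str.len (fun s => s)

def flrg (listIntervalTable : List (List String)) (tempFLR : List (List String)) : (List (String × String)) × (List (String × List String × List Int)) × List (List Int) :=
  let curr := flrgCurr listIntervalTable
  let tempNext := (List.range listIntervalTable.length).map (fun i => flrgTempNextAt tempFLR (curr.getD i ""))
  let sumNext := (List.range tempNext.length).map (fun i => flrgSumAt listIntervalTable (tempNext.getD i []))
  let tempNext2 := (List.range listIntervalTable.length).map (fun i => flrgTempNext2At tempFLR (curr.getD i ""))
  let next := (List.range tempNext2.length).map (fun i => PySem.Str.join ", " (tempNext2.getD i []))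
  (curr.zip next, curr.zip (tempNext2.zip sumNext), sumNext)

-- ===== PORT B =====
def flrg_alt (listIntervalTable : List (List String)) (tempFLR : List (List String)) : (List (String × String)) × (List (String × List String × List Int)) × List (List Int) :=
  let groups : PySem.Dict String (List String) :=
    tempFLR.foldl (fun d x => d.modify (pyStrAt x 0) [] (· ++ [pyStrAt x 1])) PySem.Dict.empty
  listIntervalTable.foldl (fun acc row =>
    let c := pyStrAt row 1
    let g := groups.getD c []
    let tn := PySem.List.sorted2 (g.filter (fun b => b != "")) PySem.Str.len (fun s => s)
    let tn2 := PySem.List.sorted2 (PySem.List.dedup g) PySem.Str.len (fun s => s)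
    let cnt := tn.foldl (fun d b => d.insert b (d.getD b 0 + 1)) PySem.Dict.empty
    let s := listIntervalTable.map (fun r => cnt.getD (pyStrAt r 1) 0)
    (acc.1 ++ [(c, PySem.Str.join ", " tn2)],
     acc.2.1 ++ [(c, tn2, s)],
     acc.2.2 ++ [s])) ([], [], [])

-- ===== PRECONDITION & SPEC =====
-- Pre_ excludes inputs on which a row of either list has fewer than two entries: Python A
-- raises IndexError on every such row it actually indexes (all of them, except tempFLR rows
-- when listIntervalTable is empty or the row's head matches no antecedent — there A returns
-- but B raises, see the cite).
def Pre_flrg (listIntervalTable : List (List String)) (tempFLR : List (List String)) : Prop :=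
  (∀ r ∈ listIntervalTable, 2 ≤ r.length) ∧ (∀ x ∈ tempFLR, 2 ≤ x.length)
instance (listIntervalTable : List (List String)) (tempFLR : List (List String)) : Decidable (Pre_flrg listIntervalTable tempFLR) := by unfold Pre_flrg; infer_instance

def pvWitness_flrg : List (List String) × List (List String) :=
  ([["10", "A1"], ["20", "A2"]], [["A1", "A2"], ["A1", ""], ["A2", "A1"]])

def Spec_flrg (listIntervalTable : List (List String)) (tempFLR : List (List String)) (out : (List (String × String)) × (List (String × List String × List Int)) × List (List Int)) : Prop := out = flrg_alt listIntervalTable tempFLR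
instance (listIntervalTable : List (List String)) (tempFLR : List (List String)) (out : (List (String × String)) × (List (String × List String × List Int)) × List (List Int)) : Decidable (Spec_flrg listIntervalTable tempFLR out) := by unfold Spec_flrg; infer_instance

-- ===== CLAIM (what is proved, stated in full; the proofs are below) =====
def Claim_equal_flrg : Prop := ∀ (listIntervalTable : List (List String)) (tempFLR : List (List String)), Dom_flrg listIntervalTable tempFLR → Pre_flrg listIntervalTable tempFLR → Spec_flrg listIntervalTable tempFLR (flrg listIntervalTable tempFLR)

-- ===== LEMMAS AND PROOFS =====

-- canonical per-antecedent values both ports are reduced to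
def pvTnBase (tempFLR : List (List String)) (c : String) : List String :=
  (tempFLR.filter (fun x => pyStrAt x 0 == c)).map (fun x => pyStrAt x 1)

def pvTn (tempFLR : List (List String)) (c : String) : List String :=
  PySem.List.sorted2 ((pvTnBase tempFLR c).filter (fun b => b != "")) PySem.Str.len (fun s => s)

def pvTn2 (tempFLR : List (List String)) (c : String) : List String :=
  PySem.List.sorted2 (PySem.List.dedup (pvTnBase tempFLR c)) PySem.Str.len (fun s => s)

def pvSum (listIntervalTable tempFLR : List (List String)) (c : String) : List Int :=
  listIntervalTable.map (fun r => (PySem.List.count (pvTn tempFLR c) (pyStrAt r 1) : Int))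

def pvCAN (T F : List (List String)) : (List (String × String)) × (List (String × List String × List Int)) × List (List Int) :=
  (T.map (fun row => (pyStrAt row 1, PySem.Str.join ", " (pvTn2 F (pyStrAt row 1)))),
   T.map (fun row => (pyStrAt row 1, pvTn2 F (pyStrAt row 1), pvSum T F (pyStrAt row 1))),
   T.map (fun row => pvSum T F (pyStrAt row 1)))

theorem pv_map_range_getD {α β : Type} (l : List α) (d : α) (f : α → β) :
    (List.range l.length).map (fun i => f (l.getD i d)) = l.map f := by
  induction l with
  | nil => simp
  | cons x xs ih =>
      simp only [List.length_cons, List.range_succ_eq_map, List.map_cons, List.map_map]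
      simpa using congrArg (f (x) :: ·) (by simpa using ih)

theorem pv_trip_foldl {α β γ δ : Type} (h1 : α → β) (h2 : α → γ) (h3 : α → δ) (l : List α) :
    ∀ (a : List β) (b : List γ) (c : List δ),
      l.foldl (fun acc row => (acc.1 ++ [h1 row], acc.2.1 ++ [h2 row], acc.2.2 ++ [h3 row])) (a, b, c)
        = (a ++ l.map h1, b ++ l.map h2, c ++ l.map h3) := by
  induction l with
  | nil => simp
  | cons x xs ih => intro a b c; simp [ih]

theorem pv_groups_getD (F : List (List String)) : ∀ (d : PySem.Dict String (List String)) (c : String),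
    (F.foldl (fun d x => d.modify (pyStrAt x 0) [] (· ++ [pyStrAt x 1])) d).getD c []
      = d.getD c [] ++ pvTnBase F c := by
  induction F with
  | nil => intro d c; simp [pvTnBase]
  | cons x xs ih =>
      intro d c
      simp only [List.foldl_cons, ih, pvTnBase, List.filter_cons]
      by_cases h : pyStrAt x 0 = c
      · simp [pvTnBase, PySem.Dict.getD_modify, h]
      · simp [pvTnBase, PySem.Dict.getD_modify, h, Ne.symm h]

theorem pv_dedup_fold (F : List (List String)) (c : String) :
    ∀ (acc : List String),
      F.foldl (fun acc x =>
          if (c == pyStrAt x 0) && !(acc.contains (pyStrAt x 1)) then acc ++ [pyStrAt x 1] else acc) acc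
        = (pvTnBase F c).foldl PySem.Set.add acc := by
  induction F with
  | nil => intro acc; simp [pvTnBase]
  | cons x xs ih =>
      intro acc
      simp only [List.foldl_cons, pvTnBase, List.filter_cons]
      by_cases h : pyStrAt x 0 = c
      · have hc : (pyStrAt x 0 == c) = true := beq_iff_eq.mpr h
        have hc' : (c == pyStrAt x 0) = true := beq_iff_eq.mpr h.symm
        have hstep : (if ((c == pyStrAt x 0) && !(acc.contains (pyStrAt x 1))) = true
              then acc ++ [pyStrAt x 1] else acc) = PySem.Set.add acc (pyStrAt x 1) := by
          rw [PySem.Set.add, hc', Bool.true_and,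
            show PySem.Set.contains acc (pyStrAt x 1) = acc.contains (pyStrAt x 1) from rfl]
          cases acc.contains (pyStrAt x 1) <;> rfl
        rw [hc, if_pos rfl, List.map_cons, List.foldl_cons, hstep]
        exact (ih _).trans (by rw [pvTnBase])
      · have hcf : (pyStrAt x 0 == c) = false := by simp [h]
        have hcf' : (c == pyStrAt x 0) = false := by simp [Ne.symm h]
        have hcond : ¬ (((c == pyStrAt x 0) && !(acc.contains (pyStrAt x 1))) = true) := by
          simp [hcf']
        rw [if_neg hcond, hcf, if_neg (show ¬ (false = true) by simp)]
        exact (ih acc).trans (by rw [pvTnBase])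

theorem pv_tn_filter (F : List (List String)) (c : String) :
    (F.foldl (fun acc x =>
        if (c == pyStrAt x 0) && (pyStrAt x 1 != "") then acc ++ [pyStrAt x 1] else acc) [])
      = (pvTnBase F c).filter (fun b => b != "") := by
  rw [PySem.List.foldl_append_if (fun x => (c == pyStrAt x 0) && (pyStrAt x 1 != "")) (fun x => pyStrAt x 1)]
  simp only [List.nil_append, pvTnBase, List.filter_map, List.filter_filter]
  apply congrArg
  apply List.filter_congr
  intro x _
  by_cases h : pyStrAt x 0 = c
  · simp [h]
  · have h1 : (pyStrAt x 0 == c) = false := by simp [h]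
    have h2 : (c == pyStrAt x 0) = false := by simp [Ne.symm h]
    rw [h1, h2]
    simp

theorem pv_tempNextAt_eq (F : List (List String)) (c : String) :
    flrgTempNextAt F c = pvTn F c := by
  rw [flrgTempNextAt, pvTn, pv_tn_filter]

theorem pv_tempNext2At_eq (F : List (List String)) (c : String) :
    flrgTempNext2At F c = pvTn2 F c := by
  rw [flrgTempNext2At, pvTn2, pv_dedup_fold]
  rfl

theorem pv_sumAt_eq (T F : List (List String)) (c : String) :
    flrgSumAt T (pvTn F c) = pvSum T F c := by
  rw [flrgSumAt, PySem.List.foldl_append_singleton_eq_map, List.nil_append, pvSum]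

theorem pv_curr_eq (T : List (List String)) :
    flrgCurr T = T.map (fun r => pyStrAt r 1) := by
  rw [flrgCurr, PySem.List.foldl_append_singleton_eq_map, List.nil_append]

theorem pv_A_can (T F : List (List String)) : flrg T F = pvCAN T F := by
  have hcur := pv_curr_eq T
  have hlen : T.length = (T.map (fun r => pyStrAt r 1)).length := by simp
  simp only [flrg, hcur, pvCAN]
  have hTN : (List.range T.length).map (fun i => flrgTempNextAt F ((T.map (fun r => pyStrAt r 1)).getD i ""))
      = T.map (fun r => pvTn F (pyStrAt r 1)) := by
    rw [hlen, pv_map_range_getD]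
    simp [pv_tempNextAt_eq]
  have hTN2 : (List.range T.length).map (fun i => flrgTempNext2At F ((T.map (fun r => pyStrAt r 1)).getD i ""))
      = T.map (fun r => pvTn2 F (pyStrAt r 1)) := by
    rw [hlen, pv_map_range_getD]
    simp [pv_tempNext2At_eq]
  rw [hTN, hTN2]
  have hSum : (List.range (T.map (fun r => pvTn F (pyStrAt r 1))).length).map
        (fun i => flrgSumAt T ((T.map (fun r => pvTn F (pyStrAt r 1))).getD i []))
      = T.map (fun r => pvSum T F (pyStrAt r 1)) := by
    rw [pv_map_range_getD]
    simp [pv_sumAt_eq]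
  rw [hSum]
  have hNext : (List.range (T.map (fun r => pvTn2 F (pyStrAt r 1))).length).map
        (fun i => PySem.Str.join ", " ((T.map (fun r => pvTn2 F (pyStrAt r 1))).getD i []))
      = T.map (fun r => PySem.Str.join ", " (pvTn2 F (pyStrAt r 1))) := by
    rw [pv_map_range_getD]
    simp
  rw [hNext, List.zip_map', List.zip_map', List.zip_map']

theorem pv_B_can (T F : List (List String)) : flrg_alt T F = pvCAN T F := by
  simp only [flrg_alt]
  rw [pv_trip_foldl]
  simp only [List.nil_append, pvCAN, Prod.mk.injEq]
  have hg : ∀ c, (List.foldl (fun d x => d.modify (pyStrAt x 0) [] (· ++ [pyStrAt x 1])) PySem.Dict.empty F).getD c []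
      = pvTnBase F c := by
    intro c
    rw [pv_groups_getD]
    simp [PySem.Dict.getD, PySem.Dict.empty, PySem.Dict.get?]
  have hcnt : ∀ (l : List String) (s : String),
      (l.foldl (fun d b => d.insert b (d.getD b 0 + 1)) PySem.Dict.empty).getD s 0
        = (PySem.List.count l s : Int) := by
    intro l s
    rw [PySem.Dict.foldl_insert_getD_add_one_eq_counter, PySem.Dict.getD_counter, PySem.List.count_eq]
  refine ⟨?_, ?_, ?_⟩ <;> (apply List.map_congr_left; intro row _)
  · simp only [hg, pvTn2]
  · simp only [hg]
    rw [show (PySem.List.sorted2 (List.filter (fun b => b != "") (pvTnBase F (pyStrAt row 1))) PySem.Str.len (fun s => s)) = pvTn F (pyStrAt row 1) from rfl]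
    simp only [hcnt, pvTn2, pvSum]
  · simp only [hg]
    rw [show (PySem.List.sorted2 (List.filter (fun b => b != "") (pvTnBase F (pyStrAt row 1))) PySem.Str.len (fun s => s)) = pvTn F (pyStrAt row 1) from rfl]
    simp only [hcnt, pvSum]

-- ===== VERDICT (by name: the statement is the Claim_ definition above) =====
theorem flrg_spec : Claim_equal_flrg := by
  intro T F _ _
  unfold Spec_flrg
  rw [pv_A_can, pv_B_can]
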